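-- pv_equiv track=rewrite | github.com/jakobkhansen/KattisSolutions | toilet/toilet.py | policy_one
-- ===== SOURCE A (Python) =====
-- def policy_one(chars):
--     adjustments = 0
--     current = chars[0]
--     preferred = 'U'
--     for char in chars[1:]:
--         if current != char:
--             adjustments += 1
--             current = char
--
--         if current != preferred:
--             adjustments += 1
--             current = preferred
--
--     return str(adjustments)
-- ===== SOURCE B (Python) =====
-- def policy_one(chars):
--     first = chars[0]
--     adjustments = 2 * sum(1 for c in chars[2:] if c != 'U')
--     if len(chars) >= 2:
--         adjustments += int(chars[1] != first) + int(chars[1] != 'U')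
--     return str(adjustments)
-- ===== Notes on version B (the rewrite author's own statement) =====
-- stated objective: simpler
-- what changed: Replaced the stateful per-element seat simulation by a closed-form count: every element from index 2 on contributes 2 iff it is not 'U', plus one boundary term for the first transition; Pre_ excludes only the empty list, on which both raise IndexError.
import Mathlib
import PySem

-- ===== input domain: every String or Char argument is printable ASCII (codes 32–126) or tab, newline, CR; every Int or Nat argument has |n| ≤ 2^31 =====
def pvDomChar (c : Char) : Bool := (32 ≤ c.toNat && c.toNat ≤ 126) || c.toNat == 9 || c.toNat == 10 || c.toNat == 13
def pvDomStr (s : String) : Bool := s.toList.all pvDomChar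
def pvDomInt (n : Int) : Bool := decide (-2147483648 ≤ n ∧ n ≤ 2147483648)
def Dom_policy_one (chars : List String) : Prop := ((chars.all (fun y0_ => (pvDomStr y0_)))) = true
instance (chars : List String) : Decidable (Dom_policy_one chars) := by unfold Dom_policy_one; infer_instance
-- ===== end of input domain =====

-- B replaces A's stateful seat simulation by a closed-form count (2 per non-'U' element
-- from index 2 on, plus one boundary term for the first transition); return value only.

-- ===== PORT A =====
-- one loop iteration of A: the two if-branches updating (adjustments, current)
def pvStepA (st : Int × String) (ch : String) : Int × String :=
  let st1 := if st.2 ≠ ch then (st.1 + 1, ch) else st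
  if st1.2 ≠ "U" then (st1.1 + 1, "U") else st1

-- literal port of A: fold over chars[1:] carrying (adjustments, current)
def policy_one (chars : List String) : String :=
  match chars with
  | [] => ""   -- chars[0] raises IndexError in Python; excluded by Pre_
  | c0 :: rest => PySem.Int.toStr (rest.foldl pvStepA ((0 : Int), c0)).1

-- ===== PORT B =====
-- literal port of Source B: count of non-'U' in chars[2:], plus the first-transition term
def policy_one_alt (chars : List String) : String :=
  match chars with
  | [] => ""   -- chars[0] raises IndexError in Python; excluded by Pre_
  | first :: rest =>
    let base : Int := 2 * ((PySem.List.slice (first :: rest) (some 2) none).countP (fun c => c ≠ "U") : Int)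
    let adj : Int :=
      if (first :: rest).length ≥ 2 then
        base + (if rest[0]! ≠ first then 1 else 0) + (if rest[0]! ≠ "U" then 1 else 0)
      else base
    PySem.Int.toStr adj

-- ===== PRECONDITION & SPEC =====
-- Pre_ excludes exactly the empty list, on which A raises IndexError (chars[0]).
def Pre_policy_one (chars : List String) : Prop := chars ≠ []
instance (chars : List String) : Decidable (Pre_policy_one chars) := by unfold Pre_policy_one; infer_instance
def pvWitness_policy_one : List String := ["U", "D", "D"]

def Spec_policy_one (chars : List String) (out : String) : Prop := out = policy_one_alt chars
instance (chars : List String) (out : String) : Decidable (Spec_policy_one chars out) := by unfold Spec_policy_one; infer_instance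

-- ===== CLAIM (what is proved, stated in full; the proofs are below) =====
def Claim_equal_policy_one : Prop := ∀ (chars : List String), Dom_policy_one chars → Pre_policy_one chars → Spec_policy_one chars (policy_one chars)

-- ===== LEMMAS AND PROOFS =====

-- from current = "U", one step adds 2 iff the element is not "U" and keeps current = "U"
lemma stepA_U (a : Int) (x : String) :
    pvStepA (a, "U") x = (a + (if x ≠ "U" then 2 else 0), "U") := by
  by_cases hx : x = "U"
  · subst hx; simp [pvStepA]
  · simp [pvStepA, hx, Ne.symm hx]
    omega

-- once current = "U", the rest of the loop is 2 · (count of non-"U" elements)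
lemma foldU (rest : List String) (a : Int) :
    rest.foldl pvStepA (a, "U") = (a + 2 * (rest.countP (fun c => c ≠ "U") : Int), "U") := by
  induction rest generalizing a with
  | nil => simp
  | cons x xs ih =>
    rw [List.foldl_cons, stepA_U, ih, List.countP_cons]
    by_cases hx : x = "U" <;> simp [hx] <;> ring

-- the first iteration: from current = chars[0], cost is the boundary term, current becomes "U"
lemma stepA_first (c0 c1 : String) :
    pvStepA ((0 : Int), c0) c1
    = ((if c1 ≠ c0 then (1 : Int) else 0) + (if c1 ≠ "U" then 1 else 0), "U") := by
  by_cases h01 : c0 = c1 <;> by_cases h1u : c1 = "U" <;>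
    simp [pvStepA, h01, h1u] <;> simp_all [eq_comm]

-- ===== VERDICT (by name: the statement is the Claim_ definition above) =====
theorem policy_one_spec : Claim_equal_policy_one := by
  intro chars _ hpre
  unfold Spec_policy_one policy_one policy_one_alt
  match chars with
  | [] => exact absurd rfl hpre
  | [c0] => simp [PySem.List.slice]
  | c0 :: c1 :: rest =>
    have hslice : PySem.List.slice (c0 :: c1 :: rest) (some 2) none = rest := by
      have := PySem.List.slice_from_natCast (c0 :: c1 :: rest) 2
      simpa using this
    simp only [hslice, List.foldl_cons, stepA_first, foldU]
    congr 1
    have h2 : (2 : ℕ) ≤ rest.length + 1 + 1 := by omega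
    simp only [List.length_cons, ge_iff_le, h2, if_true, List.getElem!_cons_zero]
    ring
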